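-- pv_equiv track=rewrite | github.com/zulip/zulip | zerver/data_import/import_util.py | make_subscriber_map
-- ===== SOURCE A (Python) =====
-- from typing import (
--     AbstractSet,
--     Any,
--     Callable,
--     Dict,
--     Iterable,
--     Iterator,
--     List,
--     Mapping,
--     Optional,
--     Protocol,
--     Set,
--     Tuple,
--     TypeVar,
-- )
-- from typing_extensions import TypeAlias
--
-- ZerverFieldsT: TypeAlias = Dict[str, Any]
--
-- def make_subscriber_map(zerver_subscription: List[ZerverFieldsT]) -> Dict[int, Set[int]]:
--     """
--     This can be convenient for building up UserMessage
--     rows.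
--     """
--     subscriber_map: Dict[int, Set[int]] = {}
--     for sub in zerver_subscription:
--         user_id = sub["user_profile"]
--         recipient_id = sub["recipient"]
--         if recipient_id not in subscriber_map:
--             subscriber_map[recipient_id] = set()
--         subscriber_map[recipient_id].add(user_id)
--
--     return subscriber_map
-- ===== SOURCE B (Python) =====
-- def make_subscriber_map(zerver_subscription):
--     """
--     This can be convenient for building up UserMessage
--     rows.
--     """
--     recipients = []
--     for sub in zerver_subscription:
--         r = sub["recipient"]
--         if r not in recipients:
--             recipients.append(r)
--     result = {}
--     for r in recipients:
--         users = set()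
--         for sub in zerver_subscription:
--             if sub["recipient"] == r:
--                 users.add(sub["user_profile"])
--         result[r] = users
--     return result
-- ===== Notes on version B (the rewrite author's own statement) =====
-- stated objective: alternative
-- what changed: Replaces the single hash-accumulation pass (dict of sets built while scanning) with a two-phase plan: first collect the distinct recipient ids in order of first appearance, then for each recipient make one filtering pass over the subscriptions to build its user set.
import Mathlib
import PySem

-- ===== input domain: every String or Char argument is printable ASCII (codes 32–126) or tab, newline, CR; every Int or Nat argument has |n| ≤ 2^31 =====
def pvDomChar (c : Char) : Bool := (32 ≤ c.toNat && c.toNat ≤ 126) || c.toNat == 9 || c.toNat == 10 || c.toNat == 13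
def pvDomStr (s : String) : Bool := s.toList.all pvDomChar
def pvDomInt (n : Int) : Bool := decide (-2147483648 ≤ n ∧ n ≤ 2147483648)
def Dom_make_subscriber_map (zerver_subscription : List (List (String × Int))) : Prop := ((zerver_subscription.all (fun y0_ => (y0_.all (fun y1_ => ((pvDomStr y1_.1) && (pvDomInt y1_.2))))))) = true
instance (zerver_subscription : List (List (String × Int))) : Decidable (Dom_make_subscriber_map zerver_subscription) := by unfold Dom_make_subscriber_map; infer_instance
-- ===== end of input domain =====

-- B builds the same dict by a different plan: first the distinct recipient ids in first-appearance
-- order, then one filtering pass per recipient; proved equal to A's single dict-of-sets pass.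
-- ===== PORT A =====
-- sub[k] for a Python dict sub; total form of the lookup, exact under Pre_ (key present)
def pvField (sub : List (String × Int)) (k : String) : Int :=
  (PySem.Dict.ofList sub).getD k 0

def make_subscriber_map (zerver_subscription : List (List (String × Int))) : List (Int × List Int) :=
  (zerver_subscription.foldl (fun subscriber_map sub =>
      let user_id := pvField sub "user_profile"
      let recipient_id := pvField sub "recipient"
      let subscriber_map :=
        if subscriber_map.contains recipient_id then subscriber_map
        else subscriber_map.insert recipient_id PySem.Set.empty
      subscriber_map.modify recipient_id PySem.Set.empty (fun s => PySem.Set.add s user_id))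
    PySem.Dict.empty).items

-- ===== PORT B =====
def make_subscriber_map_alt (zerver_subscription : List (List (String × Int))) : List (Int × List Int) :=
  let recipients := zerver_subscription.foldl (fun acc sub =>
      let r := pvField sub "recipient"
      if r ∈ acc then acc else acc ++ [r]) []
  let result := recipients.foldl (fun result r =>
      let users := zerver_subscription.foldl (fun users sub =>
          if pvField sub "recipient" = r then PySem.Set.add users (pvField sub "user_profile")
          else users) PySem.Set.empty
      result.insert r users) PySem.Dict.empty
  result.items

-- ===== PRECONDITION & SPEC =====
-- Pre_ excludes exactly the inputs where the Python A raises KeyError: a subscription dict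
-- missing the "recipient" or "user_profile" key.
def Pre_make_subscriber_map (zerver_subscription : List (List (String × Int))) : Prop :=
  ∀ sub ∈ zerver_subscription,
    "recipient" ∈ sub.map Prod.fst ∧ "user_profile" ∈ sub.map Prod.fst
instance (zerver_subscription : List (List (String × Int))) : Decidable (Pre_make_subscriber_map zerver_subscription) := by unfold Pre_make_subscriber_map; infer_instance

def pvWitness_make_subscriber_map : (List (List (String × Int))) :=
  [[("recipient", 1), ("user_profile", 5)], [("recipient", 1), ("user_profile", 7)]]

def Spec_make_subscriber_map (zerver_subscription : List (List (String × Int))) (out : List (Int × List Int)) : Prop := out = make_subscriber_map_alt zerver_subscription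
instance (zerver_subscription : List (List (String × Int))) (out : List (Int × List Int)) : Decidable (Spec_make_subscriber_map zerver_subscription out) := by unfold Spec_make_subscriber_map; infer_instance

-- ===== CLAIM (what is proved, stated in full; the proofs are below) =====
def Claim_equal_make_subscriber_map : Prop := ∀ (zerver_subscription : List (List (String × Int))), Dom_make_subscriber_map zerver_subscription → Pre_make_subscriber_map zerver_subscription → Spec_make_subscriber_map zerver_subscription (make_subscriber_map zerver_subscription)

-- ===== LEMMAS AND PROOFS =====

-- shorthand for the two field readers, A's loop body, and B's inner loop
def pvKey (sub : List (String × Int)) : Int := pvField sub "recipient"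
def pvVal (sub : List (String × Int)) : Int := pvField sub "user_profile"

def pvStepA (d : PySem.Dict Int (PySem.Set Int)) (sub : List (String × Int)) :
    PySem.Dict Int (PySem.Set Int) :=
  let d' := if d.contains (pvKey sub) then d else d.insert (pvKey sub) PySem.Set.empty
  d'.modify (pvKey sub) PySem.Set.empty (fun s => PySem.Set.add s (pvVal sub))

def pvUsers (zs : List (List (String × Int))) (r : Int) : PySem.Set Int :=
  zs.foldl (fun users sub =>
      if pvKey sub = r then PySem.Set.add users (pvVal sub) else users) PySem.Set.empty

lemma foldA_eq (zs : List (List (String × Int))) :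
    zs.foldl (fun subscriber_map sub =>
      let user_id := pvField sub "user_profile"
      let recipient_id := pvField sub "recipient"
      let subscriber_map :=
        if subscriber_map.contains recipient_id then subscriber_map
        else subscriber_map.insert recipient_id PySem.Set.empty
      subscriber_map.modify recipient_id PySem.Set.empty (fun s => PySem.Set.add s user_id))
      PySem.Dict.empty
    = zs.foldl pvStepA PySem.Dict.empty := rfl

lemma keys_stepA (d : PySem.Dict Int (PySem.Set Int)) (s : List (String × Int)) :
    (pvStepA d s).keys = PySem.Set.add d.keys (pvKey s) := by
  unfold pvStepA
  by_cases h : d.contains (pvKey s)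
  · rw [if_pos h, PySem.Dict.keys_modify, PySem.Dict.keys_insert_of_contains _ _ h,
      PySem.Set.add_of_mem ((PySem.Dict.contains_iff_mem_keys d _).mp h)]
  · have h' : d.contains (pvKey s) = false := by simpa using h
    rw [if_neg h, PySem.Dict.keys_modify, PySem.Dict.insert_insert_self,
      PySem.Dict.keys_insert_of_not_contains _ _ h',
      PySem.Set.add_of_not_mem (fun hm => h ((PySem.Dict.contains_iff_mem_keys d _).mpr hm))]

lemma keys_foldA (zs : List (List (String × Int))) (d : PySem.Dict Int (PySem.Set Int)) :
    (zs.foldl pvStepA d).keys = PySem.Set.update d.keys (zs.map pvKey) := by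
  induction zs generalizing d with
  | nil => rfl
  | cons s t ih =>
    rw [List.foldl_cons, ih, keys_stepA, List.map_cons, PySem.Set.update_cons]

lemma nodup_keys_foldA (zs : List (List (String × Int))) :
    (zs.foldl pvStepA PySem.Dict.empty).keys.Nodup := by
  rw [keys_foldA]
  exact PySem.Set.nodup_update _ _ (by simp [PySem.Dict.keys_empty])

lemma getD_stepA (d : PySem.Dict Int (PySem.Set Int)) (sub : List (String × Int)) (r : Int) :
    (pvStepA d sub).getD r PySem.Set.empty =
      if r = pvKey sub then PySem.Set.add (d.getD (pvKey sub) PySem.Set.empty) (pvVal sub)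
      else d.getD r PySem.Set.empty := by
  unfold pvStepA
  by_cases h : d.contains (pvKey sub)
  · rw [if_pos h, PySem.Dict.getD_modify]
  · rw [if_neg h, PySem.Dict.getD_modify]
    rcases eq_or_ne r (pvKey sub) with hr | hr
    · rw [if_pos hr, if_pos hr, PySem.Dict.getD_insert_self,
        PySem.Dict.getD_of_not_contains d _ (by simpa using h)]
    · rw [if_neg hr, if_neg hr, PySem.Dict.getD_insert_of_ne d _ _ hr]

lemma getD_foldA_aux (zs : List (List (String × Int))) (r : Int) :
    ∀ d : PySem.Dict Int (PySem.Set Int),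
      (zs.foldl pvStepA d).getD r PySem.Set.empty =
        zs.foldl (fun users sub =>
          if pvKey sub = r then PySem.Set.add users (pvVal sub) else users)
          (d.getD r PySem.Set.empty) := by
  induction zs with
  | nil => intro d; rfl
  | cons s t ih =>
    intro d
    rw [List.foldl_cons, ih, List.foldl_cons, getD_stepA]
    rcases eq_or_ne (pvKey s) r with hr | hr
    · subst hr; simp
    · simp [hr, hr.symm]

lemma getD_foldA (zs : List (List (String × Int))) (r : Int) :
    (zs.foldl pvStepA PySem.Dict.empty).getD r PySem.Set.empty = pvUsers zs r := by
  rw [getD_foldA_aux]; rfl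

-- B's first loop is set(...) of the recipient keys, in first-appearance order
lemma recipients_eq (zs : List (List (String × Int))) :
    zs.foldl (fun acc sub =>
      let r := pvField sub "recipient"
      if r ∈ acc then acc else acc ++ [r]) []
    = PySem.Set.ofList (zs.map pvKey) := by
  have h : ∀ (acc : PySem.Set Int), zs.foldl (fun acc sub =>
      if pvField sub "recipient" ∈ acc then acc else acc ++ [pvField sub "recipient"]) acc
      = (zs.map pvKey).foldl PySem.Set.add acc := by
    intro acc
    induction zs generalizing acc with
    | nil => rfl
    | cons s t ih => simp [List.foldl_cons, PySem.Set.add_eq_ite, ih, pvKey]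
  rw [show (fun (acc : List Int) (sub : List (String × Int)) =>
      let r := pvField sub "recipient"
      if r ∈ acc then acc else acc ++ [r]) = (fun acc sub =>
      if pvField sub "recipient" ∈ acc then acc else acc ++ [pvField sub "recipient"]) from rfl,
    h, PySem.Set.ofList_eq_foldl]

-- ===== VERDICT (by name: the statement is the Claim_ definition above) =====
theorem make_subscriber_map_spec : Claim_equal_make_subscriber_map := by
  intro zs _ _
  show make_subscriber_map zs = make_subscriber_map_alt zs
  rw [make_subscriber_map, make_subscriber_map_alt, foldA_eq, recipients_eq,
    PySem.Dict.items_eq_map_keys _ (nodup_keys_foldA zs) PySem.Set.empty,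
    keys_foldA,
    PySem.Dict.items_foldl_insert_fresh _ _ _ _
      (by intro a _; simp [PySem.Dict.contains_empty])
      (by simp)]
  simp only [PySem.Dict.keys_empty, PySem.Set.update_nil_left]
  rw [show (PySem.Dict.empty : PySem.Dict Int (PySem.Set Int)).items = [] from rfl,
    List.nil_append]
  refine List.map_congr_left (fun r hr => ?_)
  rw [getD_foldA]
  rfl
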